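-- pv_equiv track=rewrite | github.com/raeez/chiral-bar-cobar | compute/lib/stable_graph_enumeration.py | _genus_preserving_permutations
-- ===== SOURCE A (Python) =====
-- from typing import Dict, List, Tuple, Optional, Set
-- from itertools import combinations, permutations, product as cartprod
--
-- def _genus_preserving_permutations(genera: Tuple[int, ...]):
--     """Yield all permutations of vertices that preserve the genus labeling."""
--     n = len(genera)
--     # Group vertices by genus
--     genus_groups: Dict[int, List[int]] = {}
--     for v, g in enumerate(genera):
--         genus_groups.setdefault(g, []).append(v)
--
--     # Generate permutations within each genus group
--     group_perms = []
--     for g in sorted(genus_groups.keys()):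
--         verts = genus_groups[g]
--         group_perms.append((verts, list(permutations(verts))))
--
--     # Take cartesian product of group permutations
--     if not group_perms:
--         yield tuple(range(n))
--         return
--
--     perm_lists = [gp[1] for gp in group_perms]
--     vert_lists = [gp[0] for gp in group_perms]
--
--     for combo in cartprod(*perm_lists):
--         perm = list(range(n))
--         for verts, mapping in zip(vert_lists, combo):
--             for src, dst in zip(verts, mapping):
--                 perm[src] = dst
--         yield tuple(perm)
-- ===== SOURCE B (Python) =====
-- from itertools import permutations
--
-- def _genus_preserving_permutations(genera):
--     """Yield all genus-preserving vertex permutations by recursing over the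
--     genus groups, writing each group's permutation into one shared array
--     (no materialized list of per-group permutations, no cartesian product)."""
--     n = len(genera)
--     groups = {}
--     for v, g in enumerate(genera):
--         groups.setdefault(g, []).append(v)
--     group_lists = [groups[g] for g in sorted(groups)]
--
--     perm = list(range(n))
--
--     def rec(i):
--         if i == len(group_lists):
--             yield tuple(perm)
--         else:
--             verts = group_lists[i]
--             for mapping in permutations(verts):
--                 for src, dst in zip(verts, mapping):
--                     perm[src] = dst
--                 yield from rec(i + 1)
--
--     yield from rec(0)
-- ===== Notes on version B (the rewrite author's own statement) =====
-- stated objective: alternative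
-- what changed: Replaces A's materialized per-group permutation lists plus itertools.product over them (and the separate empty-groups branch) with a recursive generator that writes each group's permutation into one shared perm array and recurses to the next group, so no product tuples or permutation lists are ever materialized and the empty case falls out of the recursion.
import Mathlib
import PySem

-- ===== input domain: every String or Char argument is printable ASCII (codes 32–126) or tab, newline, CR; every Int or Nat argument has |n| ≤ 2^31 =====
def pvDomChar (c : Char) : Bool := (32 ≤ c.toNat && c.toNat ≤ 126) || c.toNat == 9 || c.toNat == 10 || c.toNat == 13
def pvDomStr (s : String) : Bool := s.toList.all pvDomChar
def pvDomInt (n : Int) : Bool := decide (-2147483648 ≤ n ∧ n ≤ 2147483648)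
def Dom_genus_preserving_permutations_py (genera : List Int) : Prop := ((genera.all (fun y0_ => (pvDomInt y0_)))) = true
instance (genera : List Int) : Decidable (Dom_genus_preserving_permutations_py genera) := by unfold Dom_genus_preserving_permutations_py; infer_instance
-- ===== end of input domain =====

-- B replaces A's materialized permutation lists + cartesian product (and its empty-groups
-- branch) with a recursive enumeration threading one perm array through the genus groups;
-- same outputs in the same order (objective: alternative).


-- ===== PORT A =====
-- itertools.product(*lists): leftmost factor varies slowest (port of the library call)
def pvCartProd : List (List (List Int)) → List (List (List Int))
  | [] => [[]]
  | l :: ls => l.flatMap (fun x => (pvCartProd ls).map (fun c => x :: c))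

def genus_preserving_permutations_py (genera : List Int) : List (List Int) :=
  let n : Int := genera.length
  -- genus_groups.setdefault(g, []).append(v)  =  modify g [] (· ++ [v])
  let genus_groups : PySem.Dict Int (List Int) :=
    (PySem.List.enumerate genera 0).foldl
      (fun d p => d.modify p.2 ([] : List Int) (fun l => l ++ [p.1])) PySem.Dict.empty
  let group_perms : List (List Int × List (List Int)) :=
    (PySem.List.sorted genus_groups.keys (fun g => g) false).map
      (fun g => (genus_groups.getD g [],
                 PySem.List.permutations (genus_groups.getD g []) (genus_groups.getD g []).length))
  if group_perms = [] then [PySem.List.pyRange 0 n 1]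
  else
    let perm_lists := group_perms.map (fun gp => gp.2)
    let vert_lists := group_perms.map (fun gp => gp.1)
    (pvCartProd perm_lists).map (fun combo =>
      (vert_lists.zip combo).foldl
        (fun perm vm => (vm.1.zip vm.2).foldl (fun q sd => PySem.List.pySetD q sd.1 sd.2) perm)
        (PySem.List.pyRange 0 n 1))

-- ===== PORT B =====
-- rec(i): write each permutation of group i into perm, recurse; yield perm at the bottom
def pvRecB : List (List Int) → List Int → List (List Int)
  | [], perm => [perm]
  | verts :: rest, perm =>
      (PySem.List.permutations verts verts.length).flatMap (fun mapping =>
        pvRecB rest ((verts.zip mapping).foldl (fun q sd => PySem.List.pySetD q sd.1 sd.2) perm))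

def genus_preserving_permutations_py_alt (genera : List Int) : List (List Int) :=
  let n : Int := genera.length
  let groups : PySem.Dict Int (List Int) :=
    (PySem.List.enumerate genera 0).foldl
      (fun d p => d.modify p.2 ([] : List Int) (fun l => l ++ [p.1])) PySem.Dict.empty
  let group_lists : List (List Int) :=
    (PySem.List.sorted groups.keys (fun g => g) false).map (fun g => groups.getD g [])
  pvRecB group_lists (PySem.List.pyRange 0 n 1)

-- ===== PRECONDITION & SPEC =====
def Spec_genus_preserving_permutations_py (genera : List Int) (out : List (List Int)) : Prop := out = genus_preserving_permutations_py_alt genera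
instance (genera : List Int) (out : List (List Int)) : Decidable (Spec_genus_preserving_permutations_py genera out) := by unfold Spec_genus_preserving_permutations_py; infer_instance

-- ===== CLAIM (what is proved, stated in full; the proofs are below) =====
def Claim_equal_genus_preserving_permutations_py : Prop := ∀ (genera : List Int), Dom_genus_preserving_permutations_py genera → Spec_genus_preserving_permutations_py genera (genus_preserving_permutations_py genera)

-- ===== LEMMAS AND PROOFS =====
-- B's recursion equals A's "cartesian product, then apply every group assignment" pass.
theorem pvRecB_eq_cartProd (gls : List (List Int)) (perm : List Int) :
    pvRecB gls perm
      = (pvCartProd (gls.map (fun vs => PySem.List.permutations vs vs.length))).map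
          (fun combo =>
            (gls.zip combo).foldl
              (fun p vm => (vm.1.zip vm.2).foldl (fun q sd => PySem.List.pySetD q sd.1 sd.2) p)
              perm) := by
  induction gls generalizing perm with
  | nil => simp [pvRecB, pvCartProd]
  | cons verts rest ih =>
      simp only [pvRecB, pvCartProd, List.map_cons, List.map_flatMap, List.map_map]
      refine List.flatMap_congr ?_
      intro mapping _
      rw [ih]
      simp [Function.comp_def]

-- ===== VERDICT (by name: the statement is the Claim_ definition above) =====
theorem genus_preserving_permutations_py_spec : Claim_equal_genus_preserving_permutations_py := by
  intro genera _
  unfold Spec_genus_preserving_permutations_py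
  unfold genus_preserving_permutations_py genus_preserving_permutations_py_alt
  simp only []
  rw [pvRecB_eq_cartProd]
  rcases h : PySem.List.sorted
      ((PySem.List.enumerate genera 0).foldl
        (fun d p => d.modify p.2 ([] : List Int) (fun l => l ++ [p.1])) PySem.Dict.empty).keys
      (fun g => g) false with _ | ⟨k, ks⟩
  · simp [h, pvCartProd]
  · simp [h, List.map_map, Function.comp_def]
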